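-- pv_equiv track=rewrite | github.com/MAKEITWITHMATTY/VirtualAssistant | V0.01/va.py | guess_intent
-- ===== SOURCE A (Python) =====
-- INTENT_MAP = [
--     ({"note","remember","jot"}, "note"),
--     ({"task","todo","remind"}, "todo"),
--     ({"time","date","clock"}, "time"),
--     ({"repeat","say","echo"}, "say"),
--     ({"help"}, "help"),
-- ]
--
-- def guess_intent(tokens):
--     words = set(w.lower() for w in tokens)
--     best = None
--     for keys, cmd in INTENT_MAP:
--         if keys & words:
--             best = cmd
--             break
--     return best
-- ===== SOURCE B (Python) =====
-- INTENT_MAP = [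
--     ({"note","remember","jot"}, "note"),
--     ({"task","todo","remind"}, "todo"),
--     ({"time","date","clock"}, "time"),
--     ({"repeat","say","echo"}, "say"),
--     ({"help"}, "help"),
-- ]
--
-- # keyword -> (priority index in INTENT_MAP, command), precomputed once
-- _KEYWORD_TABLE = {
--     "note": (0, "note"), "remember": (0, "note"), "jot": (0, "note"),
--     "task": (1, "todo"), "todo": (1, "todo"), "remind": (1, "todo"),
--     "time": (2, "time"), "date": (2, "time"), "clock": (2, "time"),
--     "repeat": (3, "say"), "say": (3, "say"), "echo": (3, "say"),
--     "help": (4, "help"),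
-- }
--
-- def guess_intent(tokens):
--     best = None
--     for t in tokens:
--         hit = _KEYWORD_TABLE.get(t.lower())
--         if hit is not None and (best is None or hit[0] < best[0]):
--             best = hit
--     return None if best is None else best[1]
-- ===== Notes on version B (the rewrite author's own statement) =====
-- stated objective: alternative
-- what changed: B inverts the traversal: instead of building a set of lowered tokens and scanning INTENT_MAP for the first entry with a non-empty intersection, it looks each lowered token up in a precomputed keyword->(priority,command) table and keeps the hit with the smallest priority.
import Mathlib
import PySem

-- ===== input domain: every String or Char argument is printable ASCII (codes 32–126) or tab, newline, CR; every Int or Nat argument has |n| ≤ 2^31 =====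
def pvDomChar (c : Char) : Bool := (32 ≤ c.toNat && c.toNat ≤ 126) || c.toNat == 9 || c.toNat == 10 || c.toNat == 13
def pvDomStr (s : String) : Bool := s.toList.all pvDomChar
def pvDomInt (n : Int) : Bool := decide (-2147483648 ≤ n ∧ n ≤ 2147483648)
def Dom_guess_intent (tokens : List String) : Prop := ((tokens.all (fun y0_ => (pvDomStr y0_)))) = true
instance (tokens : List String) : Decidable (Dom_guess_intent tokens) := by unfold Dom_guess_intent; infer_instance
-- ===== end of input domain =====

-- B replaces A's scan of INTENT_MAP (testing set intersection with the lowered tokens) by a single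
-- pass over the tokens consulting a precomputed keyword -> (priority, command) table, keeping the
-- minimum-priority hit; objective: alternative decomposition, same cost.

-- ===== PORT A =====
def intentMap : List (PySem.Set String × String) :=
  [ (PySem.Set.ofList ["note","remember","jot"], "note"),
    (PySem.Set.ofList ["task","todo","remind"], "todo"),
    (PySem.Set.ofList ["time","date","clock"], "time"),
    (PySem.Set.ofList ["repeat","say","echo"], "say"),
    (PySem.Set.ofList ["help"], "help") ]

-- the 'for keys, cmd in INTENT_MAP: if keys & words: best = cmd; break' loop
def guessLoop (words : PySem.Set String) : List (PySem.Set String × String) → Option String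
  | [] => none
  | (keys, cmd) :: rest =>
      if PySem.Set.inter keys words ≠ [] then some cmd else guessLoop words rest

def guess_intent (tokens : List String) : Option String :=
  let words : PySem.Set String := PySem.Set.ofList (tokens.map PySem.Str.lower)
  guessLoop words intentMap

-- ===== PORT B =====
def keywordTable : PySem.Dict String (Int × String) :=
  PySem.Dict.ofList
    [ ("note", (0, "note")), ("remember", (0, "note")), ("jot", (0, "note")),
      ("task", (1, "todo")), ("todo", (1, "todo")), ("remind", (1, "todo")),
      ("time", (2, "time")), ("date", (2, "time")), ("clock", (2, "time")),
      ("repeat", (3, "say")), ("say", (3, "say")), ("echo", (3, "say")),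
      ("help", (4, "help")) ]

-- body of B's 'for t in tokens' loop
def altStep (best : Option (Int × String)) (t : String) : Option (Int × String) :=
  match keywordTable.get? (PySem.Str.lower t) with
  | none => best
  | some hit =>
    match best with
    | none => some hit
    | some b => if hit.1 < b.1 then some hit else some b

def guess_intent_alt (tokens : List String) : Option String :=
  match tokens.foldl altStep none with
  | none => none
  | some b => some b.2

-- ===== PRECONDITION & SPEC =====
def Spec_guess_intent (tokens : List String) (out : Option String) : Prop := out = guess_intent_alt tokens
instance (tokens : List String) (out : Option String) : Decidable (Spec_guess_intent tokens out) := by unfold Spec_guess_intent; infer_instance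

-- ===== CLAIM (what is proved, stated in full; the proofs are below) =====
def Claim_equal_guess_intent : Prop := ∀ (tokens : List String), Dom_guess_intent tokens → Spec_guess_intent tokens (guess_intent tokens)

-- ===== LEMMAS AND PROOFS =====

-- does any token lower to a member of ks?
def flag (ks : List String) (ts : List String) : Bool :=
  ts.any (fun t => decide (PySem.Str.lower t ∈ ks))

def F (b0 b1 b2 b3 b4 : Bool) : Option (Int × String) :=
  if b0 then some (0, "note") else if b1 then some (1, "todo") else if b2 then some (2, "time")
  else if b3 then some (3, "say") else if b4 then some (4, "help") else none

-- A's intersection test, in terms of flag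
theorem inter_ne_nil_iff (ks ts : List String) :
    (PySem.Set.inter (PySem.Set.ofList ks) (PySem.Set.ofList (ts.map PySem.Str.lower)) ≠ []) ↔
      flag ks ts = true := by
  rw [← List.isEmpty_eq_false_iff, List.isEmpty_eq_false_iff_exists_mem]
  constructor
  · rintro ⟨y, hy⟩
    rw [PySem.Set.mem_inter, PySem.Set.mem_ofList, PySem.Set.mem_ofList] at hy
    obtain ⟨h1, h2⟩ := hy
    obtain ⟨t, ht, rfl⟩ := List.mem_map.mp h2
    simp only [flag, List.any_eq_true, decide_eq_true_eq]
    exact ⟨t, ht, h1⟩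
  · intro hf
    simp only [flag, List.any_eq_true, decide_eq_true_eq] at hf
    obtain ⟨t, ht, hk⟩ := hf
    refine ⟨PySem.Str.lower t, ?_⟩
    rw [PySem.Set.mem_inter, PySem.Set.mem_ofList, PySem.Set.mem_ofList]
    exact ⟨hk, List.mem_map.mpr ⟨t, ht, rfl⟩⟩

theorem A_char (ts : List String) :
    guess_intent ts =
      (if flag ["note","remember","jot"] ts then some "note"
       else if flag ["task","todo","remind"] ts then some "todo"
       else if flag ["time","date","clock"] ts then some "time"
       else if flag ["repeat","say","echo"] ts then some "say"
       else if flag ["help"] ts then some "help" else none) := by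
  simp only [guess_intent, intentMap, guessLoop]
  simp only [inter_ne_nil_iff]

set_option maxHeartbeats 1000000 in
theorem keywordTable_eq : keywordTable = PySem.Dict.mk
      [ ("note", ((0:Int), "note")), ("remember", (0, "note")), ("jot", (0, "note")),
        ("task", (1, "todo")), ("todo", (1, "todo")), ("remind", (1, "todo")),
        ("time", (2, "time")), ("date", (2, "time")), ("clock", (2, "time")),
        ("repeat", (3, "say")), ("say", (3, "say")), ("echo", (3, "say")),
        ("help", (4, "help")) ] := by decide

set_option maxHeartbeats 1000000 in
theorem hit_char (x : String) :
    keywordTable.get? x =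
      F (decide (x ∈ ["note","remember","jot"])) (decide (x ∈ ["task","todo","remind"]))
        (decide (x ∈ ["time","date","clock"])) (decide (x ∈ ["repeat","say","echo"]))
        (decide (x ∈ ["help"])) := by
  by_cases h1 : "note" = x
  · subst h1; decide
  by_cases h2 : "remember" = x
  · subst h2; decide
  by_cases h3 : "jot" = x
  · subst h3; decide
  by_cases h4 : "task" = x
  · subst h4; decide
  by_cases h5 : "todo" = x
  · subst h5; decide
  by_cases h6 : "remind" = x
  · subst h6; decide
  by_cases h7 : "time" = x
  · subst h7; decide
  by_cases h8 : "date" = x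
  · subst h8; decide
  by_cases h9 : "clock" = x
  · subst h9; decide
  by_cases h10 : "repeat" = x
  · subst h10; decide
  by_cases h11 : "say" = x
  · subst h11; decide
  by_cases h12 : "echo" = x
  · subst h12; decide
  by_cases h13 : "help" = x
  · subst h13; decide
  · rw [keywordTable_eq]
    repeat rw [PySem.Dict.get?_mk_cons]
    simp only [beq_iff_eq]
    rw [if_neg h1, if_neg h2, if_neg h3, if_neg h4, if_neg h5, if_neg h6, if_neg h7, if_neg h8, if_neg h9, if_neg h10, if_neg h11, if_neg h12, if_neg h13]
    simp [F, PySem.Dict.get?, Ne.symm h1, Ne.symm h2, Ne.symm h3, Ne.symm h4, Ne.symm h5, Ne.symm h6, Ne.symm h7, Ne.symm h8, Ne.symm h9, Ne.symm h10, Ne.symm h11, Ne.symm h12, Ne.symm h13]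

-- altStep on F-shaped accumulators
theorem step_F (a0 a1 a2 a3 a4 b0 b1 b2 b3 b4 : Bool) :
    (match F b0 b1 b2 b3 b4 with
      | none => F a0 a1 a2 a3 a4
      | some hit =>
        match F a0 a1 a2 a3 a4 with
        | none => some hit
        | some b => if hit.1 < b.1 then some hit else some b) =
      F (a0 || b0) (a1 || b1) (a2 || b2) (a3 || b3) (a4 || b4) := by
  revert a0 a1 a2 a3 a4 b0 b1 b2 b3 b4; decide

theorem B_loop (ts : List String) (a0 a1 a2 a3 a4 : Bool) :
    ts.foldl altStep (F a0 a1 a2 a3 a4) =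
      F (a0 || flag ["note","remember","jot"] ts) (a1 || flag ["task","todo","remind"] ts)
        (a2 || flag ["time","date","clock"] ts) (a3 || flag ["repeat","say","echo"] ts)
        (a4 || flag ["help"] ts) := by
  induction ts generalizing a0 a1 a2 a3 a4 with
  | nil => simp [flag]
  | cons t ts ih =>
      have hstep : altStep (F a0 a1 a2 a3 a4) t =
          F (a0 || decide (PySem.Str.lower t ∈ ["note","remember","jot"]))
            (a1 || decide (PySem.Str.lower t ∈ ["task","todo","remind"]))
            (a2 || decide (PySem.Str.lower t ∈ ["time","date","clock"]))
            (a3 || decide (PySem.Str.lower t ∈ ["repeat","say","echo"]))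
            (a4 || decide (PySem.Str.lower t ∈ ["help"])) := by
        rw [altStep, hit_char]; exact step_F _ _ _ _ _ _ _ _ _ _
      simp only [List.foldl_cons, hstep, ih, flag, List.any_cons, Bool.or_assoc]

theorem final_chain (b0 b1 b2 b3 b4 : Bool) :
    (if b0 then some "note" else if b1 then some "todo" else if b2 then some "time"
     else if b3 then some "say" else if b4 then some "help" else none) =
      (match F b0 b1 b2 b3 b4 with | none => none | some b => some b.2) := by
  revert b0 b1 b2 b3 b4; decide

-- ===== VERDICT (by name: the statement is the Claim_ definition above) =====
theorem guess_intent_spec : Claim_equal_guess_intent := by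
  intro ts _
  show guess_intent ts = guess_intent_alt ts
  rw [A_char, guess_intent_alt]
  have : ts.foldl altStep none = F (flag ["note","remember","jot"] ts) (flag ["task","todo","remind"] ts)
      (flag ["time","date","clock"] ts) (flag ["repeat","say","echo"] ts) (flag ["help"] ts) := by
    have := B_loop ts false false false false false
    simpa [F] using this
  rw [this, final_chain]
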